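-- pv_equiv track=rewrite | github.com/mozilla/kitsune | kitsune/search/search.py | _has_advanced_syntax
-- ===== SOURCE A (Python) =====
-- def _has_advanced_syntax(query_text: str | None = None) -> bool:
--     """Check if query contains advanced syntax that requires traditional search."""
--     if not query_text:
--         return False
--
--     # Check for field operators (specific fields and generic patterns)
--     field_indicators = [
--         'field:', 'exact:', 'range:', 'title:', 'content:', 'keywords:',
--         'summary:', 'question:', 'answer:'
--     ]
--
--     # Check for boolean operators
--     boolean_indicators = [
--         ' AND ', ' OR ', ' NOT '
--     ]
--
--     # Also check for quoted phrases
--     if '"' in query_text and query_text.count('"') >= 2: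
--         return True
--
--     # Check all indicators
--     return (any(indicator in query_text for indicator in field_indicators) or
--             any(indicator in query_text for indicator in boolean_indicators))
-- ===== SOURCE B (Python) =====
-- _INDICATORS = (
--     'field:', 'exact:', 'range:', 'title:', 'content:', 'keywords:',
--     'summary:', 'question:', 'answer:',
--     ' AND ', ' OR ', ' NOT ',
-- )
--
--
-- def _has_advanced_syntax(query_text=None):
--     """Check if query contains advanced syntax that requires traditional search."""
--     if not query_text:
--         return False
--
--     # Single left-to-right pass with an accumulator: count quote characters as
--     # we go (two quotes = quoted phrase) and at each position test whether one
--     # of the indicators starts right here; return True as soon as either rule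
--     # fires, False if the scan finishes without firing.
--     quotes = 0
--     for i, ch in enumerate(query_text):
--         if ch == '"':
--             quotes += 1
--             if quotes >= 2:
--                 return True
--         if any(query_text.startswith(p, i) for p in _INDICATORS):
--             return True
--     return False
-- ===== Notes on version B (the rewrite author's own statement) =====
-- stated objective: alternative
-- what changed: Replaces A's staged checks (a quote-count pass plus two per-indicator substring-membership loops) with a single left-to-right scan carrying a quote-count accumulator and testing at each position whether an indicator starts there, with early exit as soon as either rule fires.
import Mathlib
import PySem

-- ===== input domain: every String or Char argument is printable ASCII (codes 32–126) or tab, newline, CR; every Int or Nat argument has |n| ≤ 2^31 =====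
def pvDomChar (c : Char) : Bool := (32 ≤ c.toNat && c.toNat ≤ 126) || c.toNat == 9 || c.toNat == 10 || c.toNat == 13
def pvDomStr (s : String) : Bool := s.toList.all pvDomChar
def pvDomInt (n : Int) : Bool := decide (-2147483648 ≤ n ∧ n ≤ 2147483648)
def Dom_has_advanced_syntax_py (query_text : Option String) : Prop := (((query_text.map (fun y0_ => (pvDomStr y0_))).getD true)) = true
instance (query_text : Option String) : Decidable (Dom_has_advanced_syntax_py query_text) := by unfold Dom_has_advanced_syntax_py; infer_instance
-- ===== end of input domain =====

-- ===== PORT A =====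
-- B replaces A's staged checks by one single left-to-right scan with a quote-count
-- accumulator and early exit (alternative decomposition, same cost).
def fieldIndicators : List String :=
  ["field:", "exact:", "range:", "title:", "content:", "keywords:",
   "summary:", "question:", "answer:"]

def booleanIndicators : List String := [" AND ", " OR ", " NOT "]

def has_advanced_syntax_py (query_text : Option String) : Bool :=
  match query_text with
  | none => false
  | some s =>
    if s = "" then false     -- 'if not query_text'
    else if PySem.Str.isIn "\"" s && 2 ≤ PySem.Str.count s "\"" then true
    else fieldIndicators.any (fun ind => PySem.Str.isIn ind s)
         || booleanIndicators.any (fun ind => PySem.Str.isIn ind s)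

-- ===== PORT B =====
def altIndicators : List String :=
  ["field:", "exact:", "range:", "title:", "content:", "keywords:",
   "summary:", "question:", "answer:", " AND ", " OR ", " NOT "]

-- the for-loop of Source B: walk the text's suffixes, `quotes` is the accumulator;
-- 'query_text.startswith(p, i)' at a valid position i is 'p is a prefix of the suffix at i'
def altScan (quotes : Nat) : List Char → Bool
  | [] => false
  | c :: rest =>
    let quotes' := if c = '"' then quotes + 1 else quotes
    if c = '"' && 2 ≤ quotes' then true
    else if altIndicators.any (fun p => p.toList.isPrefixOf (c :: rest)) then true
    else altScan quotes' rest

def has_advanced_syntax_py_alt (query_text : Option String) : Bool :=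
  match query_text with
  | none => false
  | some s =>
    if s = "" then false
    else altScan 0 s.toList

-- ===== PRECONDITION & SPEC =====
def Spec_has_advanced_syntax_py (query_text : Option String) (out : Bool) : Prop := out = has_advanced_syntax_py_alt query_text
instance (query_text : Option String) (out : Bool) : Decidable (Spec_has_advanced_syntax_py query_text out) := by unfold Spec_has_advanced_syntax_py; infer_instance

-- ===== CLAIM (what is proved, stated in full; the proofs are below) =====
def Claim_equal_has_advanced_syntax_py : Prop := ∀ (query_text : Option String), Dom_has_advanced_syntax_py query_text → Spec_has_advanced_syntax_py query_text (has_advanced_syntax_py query_text)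

-- ===== LEMMAS AND PROOFS =====
-- "some indicator starts at some position of l" as a simple recursion over suffixes
def sufAny : List Char → Bool
  | [] => false
  | c :: rest => altIndicators.any (fun p => p.toList.isPrefixOf (c :: rest)) || sufAny rest

-- the scan with accumulator q ≤ 1 computes: quotes reach 2, or an indicator occurs
theorem anyPrefix_eq (m : List Char) :
    (altIndicators.any fun p => p.toList.isPrefixOf m)
      = decide (∃ x ∈ altIndicators, x.toList <+: m) := by
  rw [Bool.eq_iff_iff]
  simp [List.any_eq_true, List.isPrefixOf_iff_prefix]

theorem altScan_eq (l : List Char) : ∀ q, q ≤ 1 →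
    altScan q l = (decide (2 ≤ q + l.count '"') || sufAny l) := by
  induction l with
  | nil => intro q hq; simp [altScan, sufAny]; omega
  | cons c rest ih =>
    intro q hq
    by_cases hc : c = '"'
    · subst hc
      rcases Nat.le_one_iff_eq_zero_or_eq_one.mp hq with rfl | rfl
      · simp [altScan, sufAny, List.count_cons, ih 1 (by omega)]
        have h1 : (2 ≤ 1 + List.count '"' rest) ↔ '"' ∈ rest := by
          rw [← List.count_pos_iff]; omega
        simp [h1, anyPrefix_eq]
        cases decide ('"' ∈ rest) <;> cases sufAny rest <;>
          simp [Bool.or_comm, Bool.or_left_comm]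
      · simp [altScan, sufAny, List.count_cons]
        omega
    · simp [altScan, sufAny, List.count_cons, hc, ih q hq, anyPrefix_eq]
      cases decide (2 ≤ q + List.count '"' rest) <;> cases sufAny rest <;>
        simp [Bool.or_comm, Bool.or_left_comm]

-- one nonempty pattern occurring at some suffix = substring membership
theorem suf_one_eq (l p : List Char) (hp : p ≠ []) :
    ((List.range l.length).any fun i => p.isPrefixOf (l.drop i)) = PySem.Chars.isIn p l := by
  cases h : PySem.Chars.isIn p l with
  | false =>
    refine List.any_eq_false.mpr ?_
    intro i _ hpre
    have := (PySem.Chars.exists_prefix_drop_iff_isIn p l).mp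
      ⟨i, List.isPrefixOf_iff_prefix.mp hpre⟩
    simp [h] at this
  | true =>
    obtain ⟨j, hj⟩ := (PySem.Chars.exists_prefix_drop_iff_isIn p l).mpr h
    simp only [List.any_eq_true, List.mem_range, List.isPrefixOf_iff_prefix]
    refine ⟨j, ?_, hj⟩
    by_contra hlt
    have hnil : l.drop j = [] := List.drop_eq_nil_of_le (by omega)
    rw [hnil] at hj
    exact hp (List.prefix_nil.mp hj)

-- sufAny as a range-scan
theorem sufAny_eq_range (l : List Char) :
    sufAny l = ((List.range l.length).any fun i =>
      altIndicators.any fun p => p.toList.isPrefixOf (l.drop i)) := by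
  induction l with
  | nil => simp [sufAny]
  | cons c rest ih =>
    rw [sufAny, ih]
    rw [List.length_cons, List.range_succ_eq_map, List.any_cons, List.any_map]
    simp [Function.comp_def, List.drop_succ_cons]

-- the suffix scan equals the pattern-major membership test
theorem sufAny_eq (l : List Char) :
    sufAny l = altIndicators.any (fun p => PySem.Chars.isIn p.toList l) := by
  rw [sufAny_eq_range]
  cases h : altIndicators.any (fun p => PySem.Chars.isIn p.toList l) with
  | false =>
    refine List.any_eq_false.mpr ?_
    intro i hi hc
    obtain ⟨p, hpmem, hpre⟩ := List.any_eq_true.mp hc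
    have h2 := List.any_eq_false.mp h p hpmem
    have hpne : p.toList ≠ [] := by
      fin_cases hpmem <;> decide
    rw [← suf_one_eq l p.toList hpne] at h2
    exact h2 (List.any_eq_true.mpr ⟨i, hi, hpre⟩)
  | true =>
    obtain ⟨p, hpmem, hin⟩ := List.any_eq_true.mp h
    have hpne : p.toList ≠ [] := by
      fin_cases hpmem <;> decide
    rw [← suf_one_eq l p.toList hpne] at hin
    obtain ⟨i, hi, hpre⟩ := List.any_eq_true.mp hin
    exact List.any_eq_true.mpr ⟨i, hi, List.any_eq_true.mpr ⟨p, hpmem, hpre⟩⟩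

-- single-char count.go with enough fuel counts the character occurrences
theorem count_go_single (c : Char) : ∀ (l : List Char) (fuel acc : Nat), l.length ≤ fuel →
    PySem.Chars.count.go [c] fuel l acc = acc + l.count c := by
  intro l
  induction l with
  | nil =>
    intro fuel acc _
    cases fuel <;> simp [PySem.Chars.count.go]
  | cons h t ih =>
    intro fuel acc hf
    cases fuel with
    | zero => simp at hf
    | succ f =>
      have ht : t.length ≤ f := by simpa using hf
      by_cases hc : c = h
      · subst hc
        have hstep : PySem.Chars.count.go [c] (f + 1) (c :: t) acc
            = PySem.Chars.count.go [c] f t (acc + 1) := by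
          simp [PySem.Chars.count.go, List.isPrefixOf]
        rw [hstep, ih f (acc + 1) ht, List.count_cons]
        simp
        omega
      · have hpre : ([c].isPrefixOf (h :: t)) = false := by
          simp [List.isPrefixOf, hc, Ne.symm hc]
        have hstep : PySem.Chars.count.go [c] (f + 1) (h :: t) acc
            = PySem.Chars.count.go [c] f t acc := by
          simp [PySem.Chars.count.go, hpre]
        rw [hstep, ih f acc ht, List.count_cons]
        simp [hc, Ne.symm hc]

theorem count_single (c : Char) (l : List Char) :
    PySem.Chars.count l [c] = l.count c := by
  simpa using count_go_single c l l.length 0 le_rfl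

-- A's quote check as a bare count comparison ('"' in s is implied by count ≥ 2)
theorem quote_check_eq (l : List Char) :
    (PySem.Chars.isIn ['"'] l && decide (2 ≤ PySem.Chars.count l ['"']))
      = decide (2 ≤ l.count '"') := by
  rw [count_single]
  by_cases h2 : 2 ≤ l.count '"'
  · have hmem : '"' ∈ l := List.count_pos_iff.mp (by omega)
    have hin : PySem.Chars.isIn ['"'] l = true := by
      rw [PySem.Chars.isIn_iff_infix]
      obtain ⟨pre, suf, rfl⟩ := List.mem_iff_append.mp hmem
      exact ⟨pre, suf, by simp⟩
    simp [hin, h2]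
  · simp [h2]

-- ===== VERDICT (by name: the statement is the Claim_ definition above) =====
theorem has_advanced_syntax_py_spec : Claim_equal_has_advanced_syntax_py := by
  intro q _
  unfold Spec_has_advanced_syntax_py has_advanced_syntax_py has_advanced_syntax_py_alt
  match q with
  | none => rfl
  | some s =>
    dsimp only
    by_cases hs : s = ""
    · simp [hs]
    · rw [if_neg hs, if_neg hs]
      rw [altScan_eq s.toList 0 (by omega), sufAny_eq,
          show altIndicators = fieldIndicators ++ booleanIndicators from rfl, List.any_append]
      have htl : ("\"" : String).toList = ['"'] := rfl
      have hq : (PySem.Str.isIn "\"" s && decide (2 ≤ PySem.Str.count s "\""))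
          = decide (2 ≤ (0 : Nat) + s.toList.count '"') := by
        rw [PySem.Str.isIn_eq, PySem.Str.count_eq, htl]
        simpa using quote_check_eq s.toList
      rw [← hq]
      simp only [PySem.Str.isIn_eq]
      cases hb : (PySem.Str.isIn "\"" s && decide (2 ≤ PySem.Str.count s "\"")) <;>
        · simp [hb, PySem.Str.isIn_eq]
          rfl
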